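-- pv_equiv track=rewrite | github.com/DeepBlueDynamics/nemesis8 | MCP/pdf-reader.py | _parse_page_spec
-- ===== SOURCE A (Python) =====
-- from typing import Dict, List, Optional
--
-- def _parse_page_spec(page_spec: str, page_count: int) -> List[int]:
--     """
--     Parse a page spec string like:
--     - "all"
--     - "1,3,5"
--     - "1-4,8,10-12"
--     Returns 1-based page numbers.
--     """
--     if not page_spec or page_spec.strip().lower() == "all":
--         return list(range(1, page_count + 1))
--
--     pages: List[int] = []
--     seen = set()
--     for raw_token in page_spec.split(","):
--         token = raw_token.strip()
--         if not token:
--             continue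
--         if "-" in token:
--             parts = token.split("-", 1)
--             if len(parts) != 2:
--                 raise ValueError(f"invalid_page_range: {token}")
--             start = int(parts[0].strip())
--             end = int(parts[1].strip())
--             if start > end:
--                 raise ValueError(f"invalid_page_range: {token}")
--             for page_num in range(start, end + 1):
--                 if page_num < 1 or page_num > page_count:
--                     raise ValueError(f"page_out_of_range: {page_num}")
--                 if page_num not in seen:
--                     seen.add(page_num)
--                     pages.append(page_num)
--         else:
--             page_num = int(token)
--             if page_num < 1 or page_num > page_count:
--                 raise ValueError(f"page_out_of_range: {page_num}")
--             if page_num not in seen: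
--                 seen.add(page_num)
--                 pages.append(page_num)
--
--     if not pages:
--         raise ValueError("no_pages_selected")
--     return pages
-- ===== SOURCE B (Python) =====
-- def _parse_page_spec(page_spec: str, page_count: int):
--     """Interval expansion + sort-based dedup: expand every token wholesale into a
--     flat list (ranges appended en bloc, same validation/exceptions), then obtain
--     the unique pages by sorting the distinct elements by their first-occurrence
--     index -- no 'seen' set and no membership test during construction."""
--     if not page_spec or page_spec.strip().lower() == "all":
--         return list(range(1, page_count + 1))
--
--     flat = []
--     for raw_token in page_spec.split(","):
--         token = raw_token.strip()
--         if not token: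
--             continue
--         if "-" in token:
--             start_s, end_s = token.split("-", 1)
--             start, end = int(start_s.strip()), int(end_s.strip())
--             if start > end:
--                 raise ValueError(f"invalid_page_range: {token}")
--         else:
--             start = end = int(token)
--         if start < 1 or end > page_count:
--             raise ValueError("page_out_of_range")
--         flat += range(start, end + 1)
--
--     if not flat:
--         raise ValueError("no_pages_selected")
--     return sorted(set(flat), key=flat.index)
-- ===== Notes on version B (the rewrite author's own statement) =====
-- stated objective: alternative
-- what changed: A deduplicates on the fly with a 'seen' set, appending page-by-page inside the token loop; B never tests membership while building: it expands each token wholesale into a flat list (ranges appended en bloc) and then recovers the unique pages by sorting the distinct elements by their first-occurrence index (sorted(set(flat), key=flat.index)).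
import Mathlib
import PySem

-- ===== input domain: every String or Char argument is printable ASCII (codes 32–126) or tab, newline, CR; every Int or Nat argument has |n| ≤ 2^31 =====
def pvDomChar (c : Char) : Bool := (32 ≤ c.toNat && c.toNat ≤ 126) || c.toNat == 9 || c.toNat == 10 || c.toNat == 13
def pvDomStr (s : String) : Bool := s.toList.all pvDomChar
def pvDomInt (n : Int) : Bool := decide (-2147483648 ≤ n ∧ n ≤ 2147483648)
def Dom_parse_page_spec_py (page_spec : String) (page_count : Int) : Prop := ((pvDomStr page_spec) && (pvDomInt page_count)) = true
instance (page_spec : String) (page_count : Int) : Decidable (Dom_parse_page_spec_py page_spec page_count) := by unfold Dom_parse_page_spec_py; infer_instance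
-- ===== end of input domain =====

-- B replaces A's incremental seen-set dedup with interval expansion plus a sort of the
-- distinct pages by first-occurrence index (objective: alternative algorithm, same result).
-- Pre_ excludes inputs on which the Python A raises ValueError; there the ports return [].

-- ===== PORT A =====
-- A's per-token step: state is (pages, seen); none = ValueError
def pvATok (page_count : Int) (st : List Int × PySem.Set Int) (raw_token : String) :
    Option (List Int × PySem.Set Int) :=
  let token := PySem.Str.strip raw_token
  if token = "" then some st
  else if PySem.Str.isIn "-" token then
    match PySem.Str.splitMax? token "-" 1 with
    | none => none
    | some parts =>
      if parts.length ≠ 2 then none  -- raise invalid_page_range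
      else
        match PySem.Int.ofStr? (PySem.Str.strip (parts.getD 0 "")) with
        | none => none  -- int() ValueError
        | some start =>
          match PySem.Int.ofStr? (PySem.Str.strip (parts.getD 1 "")) with
          | none => none
          | some end_ =>
            if start > end_ then none  -- raise invalid_page_range
            else
              (PySem.List.pyRange start (end_ + 1) 1).foldl
                (fun ost page_num => ost.bind (fun (pages, seen) =>
                  if page_num < 1 ∨ page_num > page_count then none  -- page_out_of_range
                  else if seen.contains page_num then some (pages, seen)
                  else some (pages ++ [page_num], seen.add page_num)))
                (some st)
  else
    match PySem.Int.ofStr? token with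
    | none => none
    | some page_num =>
      if page_num < 1 ∨ page_num > page_count then none  -- page_out_of_range
      else if st.2.contains page_num then some st
      else some (st.1 ++ [page_num], st.2.add page_num)

def parse_page_spec_py (page_spec : String) (page_count : Int) : List Int :=
  if page_spec = "" ∨ PySem.Str.lower (PySem.Str.strip page_spec) = "all" then
    PySem.List.pyRange 1 (page_count + 1) 1
  else
    match ((PySem.Str.split? page_spec ",").getD []).foldl
        (fun ost raw => ost.bind (fun st => pvATok page_count st raw))
        (some (([] : List Int), (PySem.Set.empty : PySem.Set Int))) with
    | none => []  -- a ValueError was raised: outside Pre_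
    | some (pages, _) => if pages = [] then [] else pages  -- raise no_pages_selected

-- ===== PORT B =====
-- B's pass-1 step: expand one token wholesale onto the flat list; none = ValueError
def pvBTok (page_count : Int) (flat : List Int) (raw_token : String) : Option (List Int) :=
  let token := PySem.Str.strip raw_token
  if token = "" then some flat
  else
    let se? : Option (Int × Int) :=
      if PySem.Str.isIn "-" token then
        match PySem.Str.splitMax? token "-" 1 with
        | some [start_s, end_s] =>
          match PySem.Int.ofStr? (PySem.Str.strip start_s),
                PySem.Int.ofStr? (PySem.Str.strip end_s) with
          | some start, some end_ =>
            if start > end_ then none else some (start, end_)  -- invalid_page_range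
          | _, _ => none  -- int() ValueError
        | _ => none
      else (PySem.Int.ofStr? token).map (fun v => (v, v))
    match se? with
    | none => none
    | some (start, end_) =>
      if start < 1 ∨ end_ > page_count then none  -- page_out_of_range
      else some (flat ++ PySem.List.pyRange start (end_ + 1) 1)

-- sorted(set(flat), key=flat.index): key is flat.index(p), always found for p in set(flat)
def parse_page_spec_py_alt (page_spec : String) (page_count : Int) : List Int :=
  if page_spec = "" ∨ PySem.Str.lower (PySem.Str.strip page_spec) = "all" then
    PySem.List.pyRange 1 (page_count + 1) 1
  else
    match ((PySem.Str.split? page_spec ",").getD []).foldl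
        (fun o raw => o.bind (fun flat => pvBTok page_count flat raw)) (some []) with
    | none => []  -- a ValueError was raised: outside Pre_
    | some flat =>
      if flat = [] then []  -- raise no_pages_selected
      else PySem.List.sorted (PySem.Set.ofList flat)
          (fun p => (PySem.List.index? flat p).getD 0) false

-- ===== PRECONDITION & SPEC =====
-- helpers for Pre_: validity of a parsed range / single page (none = int() ValueError)
def pvRangeOK (page_count : Int) : Option Int → Option Int → Bool
  | some a, some b => decide (a ≤ b) && decide (1 ≤ a) && decide (b ≤ page_count)
  | _, _ => false

def pvSingleOK (page_count : Int) : Option Int → Bool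
  | some v => decide (1 ≤ v) && decide (v ≤ page_count)
  | none => false

-- a stripped nonempty token that parses and lies in bounds (A raises on any other)
def pvTokOK (page_count : Int) (t : String) : Bool :=
  if PySem.Str.isIn "-" t then
    match PySem.Str.splitMax? t "-" 1 with
    | some [s, e] =>
      pvRangeOK page_count (PySem.Int.ofStr? (PySem.Str.strip s))
        (PySem.Int.ofStr? (PySem.Str.strip e))
    | _ => false
  else
    pvSingleOK page_count (PySem.Int.ofStr? t)

-- Pre_ = exactly the inputs on which Python A returns (no ValueError): the
-- "all"/empty short-circuit, or every nonempty token valid and at least one of them.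
def Pre_parse_page_spec_py (page_spec : String) (page_count : Int) : Prop :=
  page_spec = "" ∨ PySem.Str.lower (PySem.Str.strip page_spec) = "all" ∨
  ((((PySem.Str.split? page_spec ",").getD []).map PySem.Str.strip).filter (· ≠ "") ≠ [] ∧
   ∀ t ∈ (((PySem.Str.split? page_spec ",").getD []).map PySem.Str.strip).filter (· ≠ ""),
     pvTokOK page_count t = true)
instance (page_spec : String) (page_count : Int) : Decidable (Pre_parse_page_spec_py page_spec page_count) := by
  unfold Pre_parse_page_spec_py; infer_instance

def pvWitness_parse_page_spec_py : String × Int := ("1-3, 5 ,2", 6)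

def Spec_parse_page_spec_py (page_spec : String) (page_count : Int) (out : List Int) : Prop :=
  out = parse_page_spec_py_alt page_spec page_count
instance (page_spec : String) (page_count : Int) (out : List Int) : Decidable (Spec_parse_page_spec_py page_spec page_count out) := by
  unfold Spec_parse_page_spec_py; infer_instance

-- ===== CLAIM (what is proved, stated in full; the proofs are below) =====
def Claim_equal_parse_page_spec_py : Prop :=
  ∀ (page_spec : String) (page_count : Int),
    Dom_parse_page_spec_py page_spec page_count →
    Pre_parse_page_spec_py page_spec page_count →
    Spec_parse_page_spec_py page_spec page_count (parse_page_spec_py page_spec page_count)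

-- ===== LEMMAS AND PROOFS =====

-- the pages a single valid stripped token denotes
def pvExpandRange : Option Int → Option Int → List Int
  | some a, some b => PySem.List.pyRange a (b + 1) 1
  | _, _ => []

def pvExpandSingle : Option Int → List Int
  | some v => [v]
  | none => []

def pvExpand (t : String) : List Int :=
  if PySem.Str.isIn "-" t then
    match PySem.Str.splitMax? t "-" 1 with
    | some [s, e] =>
      pvExpandRange (PySem.Int.ofStr? (PySem.Str.strip s)) (PySem.Int.ofStr? (PySem.Str.strip e))
    | _ => []
  else
    pvExpandSingle (PySem.Int.ofStr? t)

theorem pvInner (page_count : Int) (l : List Int) (p : List Int)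
    (h : ∀ x ∈ l, ¬(x < 1 ∨ x > page_count)) :
    l.foldl
      (fun ost page_num => ost.bind (fun st : List Int × PySem.Set Int =>
        if page_num < 1 ∨ page_num > page_count then none
        else if st.2.contains page_num then some (st.1, st.2)
        else some (st.1 ++ [page_num], st.2.add page_num)))
      (some (p, p)) = some (PySem.Set.update p l, PySem.Set.update p l) := by
  induction l generalizing p with
  | nil => simp [PySem.Set.update]
  | cons x xs ih =>
    have hx := h x (List.mem_cons_self)
    simp only [List.foldl_cons, Option.bind_some, if_neg hx]
    rw [show (if PySem.Set.contains p x = true then some (p, p)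
        else some (p ++ [x], PySem.Set.add p x)) = some (PySem.Set.add p x, PySem.Set.add p x) from by
      by_cases hm : x ∈ p <;> simp [PySem.Set.add, hm]]
    rw [ih _ (fun y hy => h y (List.mem_cons_of_mem _ hy))]
    simp [PySem.Set.update]

theorem pvExpand_empty : pvExpand "" = [] := by decide

theorem pvTokOK_ne_empty (page_count : Int) (h : pvTokOK page_count "" = true) : False := by
  rw [pvTokOK, show PySem.Str.isIn "-" "" = false from by decide] at h
  rw [if_neg (by simp)] at h
  rw [show PySem.Int.ofStr? "" = none from by decide] at h
  exact Bool.noConfusion h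

theorem pvATok_ok (page_count : Int) (p : List Int) (raw : String)
    (h : PySem.Str.strip raw = "" ∨ pvTokOK page_count (PySem.Str.strip raw) = true) :
    pvATok page_count (p, p) raw =
      some (PySem.Set.update p (pvExpand (PySem.Str.strip raw)),
            PySem.Set.update p (pvExpand (PySem.Str.strip raw))) := by
  rcases h with h0 | ht
  · rw [pvATok, h0, pvExpand_empty]
    simp [PySem.Set.update]
  · have ht0 : PySem.Str.strip raw ≠ "" := by
      intro he; rw [he] at ht; exact pvTokOK_ne_empty page_count ht
    rw [pvTokOK] at ht
    rw [pvATok, pvExpand]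
    simp only [if_neg ht0]
    by_cases hin : PySem.Str.isIn "-" (PySem.Str.strip raw) = true
    · simp only [hin, if_true] at ht ⊢
      generalize hsp : PySem.Str.splitMax? (PySem.Str.strip raw) "-" 1 = sp at ht
      rcases sp with _ | parts
      · exact Bool.noConfusion ht
      rcases parts with _ | ⟨s0, parts⟩
      · exact Bool.noConfusion ht
      rcases parts with _ | ⟨e0, parts⟩
      · exact Bool.noConfusion ht
      rcases parts with _ | ⟨z0, parts⟩
      swap
      · exact Bool.noConfusion ht
      replace ht : pvRangeOK page_count (PySem.Int.ofStr? (PySem.Str.strip s0))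
          (PySem.Int.ofStr? (PySem.Str.strip e0)) = true := ht
      generalize ha : PySem.Int.ofStr? (PySem.Str.strip s0) = oa at ht
      generalize hb : PySem.Int.ofStr? (PySem.Str.strip e0) = ob at ht
      rcases oa with _ | a <;> rcases ob with _ | b
      · exact Bool.noConfusion ht
      · exact Bool.noConfusion ht
      · exact Bool.noConfusion ht
      replace ht : (decide (a ≤ b) && decide (1 ≤ a) && decide (b ≤ page_count)) = true := ht
      simp only [Bool.and_eq_true, decide_eq_true_eq] at ht
      obtain ⟨⟨hab, ha1⟩, hbc⟩ := ht
      simp only [hsp]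
      rw [if_neg (by simp : ¬ (([s0, e0] : List String).length ≠ 2))]
      simp only [List.getD_cons_zero, List.getD_cons_succ, ha, hb, pvExpandRange]
      rw [if_neg (by omega : ¬ a > b)]
      have hbnd : ∀ x ∈ PySem.List.pyRange a (b + 1) 1, ¬(x < 1 ∨ x > page_count) := by
        intro x hx
        rw [PySem.List.mem_pyRange_one] at hx
        omega
      exact pvInner page_count _ p hbnd
    · rw [Bool.not_eq_true] at hin
      simp only [hin, Bool.false_eq_true, if_false] at ht ⊢
      generalize hv : PySem.Int.ofStr? (PySem.Str.strip raw) = ov at ht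
      rcases ov with _ | v
      · exact Bool.noConfusion ht
      replace ht : (decide (1 ≤ v) && decide (v ≤ page_count)) = true := ht
      simp only [Bool.and_eq_true, decide_eq_true_eq] at ht
      simp only [pvExpandSingle]
      rw [if_neg (by omega : ¬(v < 1 ∨ v > page_count))]
      by_cases hm : v ∈ p <;>
        simp [PySem.Set.update, PySem.Set.add, hm]

theorem pvBTok_ok (page_count : Int) (acc : List Int) (raw : String)
    (h : PySem.Str.strip raw = "" ∨ pvTokOK page_count (PySem.Str.strip raw) = true) :
    pvBTok page_count acc raw = some (acc ++ pvExpand (PySem.Str.strip raw)) := by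
  rcases h with h0 | ht
  · rw [pvBTok, h0, pvExpand_empty]
    simp
  · have ht0 : PySem.Str.strip raw ≠ "" := by
      intro he; rw [he] at ht; exact pvTokOK_ne_empty page_count ht
    rw [pvTokOK] at ht
    rw [pvBTok, pvExpand]
    simp only [if_neg ht0]
    by_cases hin : PySem.Str.isIn "-" (PySem.Str.strip raw) = true
    · simp only [hin, if_true] at ht ⊢
      generalize hsp : PySem.Str.splitMax? (PySem.Str.strip raw) "-" 1 = sp at ht
      rcases sp with _ | parts
      · exact Bool.noConfusion ht
      rcases parts with _ | ⟨s0, parts⟩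
      · exact Bool.noConfusion ht
      rcases parts with _ | ⟨e0, parts⟩
      · exact Bool.noConfusion ht
      rcases parts with _ | ⟨z0, parts⟩
      swap
      · exact Bool.noConfusion ht
      replace ht : pvRangeOK page_count (PySem.Int.ofStr? (PySem.Str.strip s0))
          (PySem.Int.ofStr? (PySem.Str.strip e0)) = true := ht
      generalize ha : PySem.Int.ofStr? (PySem.Str.strip s0) = oa at ht
      generalize hb : PySem.Int.ofStr? (PySem.Str.strip e0) = ob at ht
      rcases oa with _ | a <;> rcases ob with _ | b
      · exact Bool.noConfusion ht
      · exact Bool.noConfusion ht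
      · exact Bool.noConfusion ht
      replace ht : (decide (a ≤ b) && decide (1 ≤ a) && decide (b ≤ page_count)) = true := ht
      simp only [Bool.and_eq_true, decide_eq_true_eq] at ht
      obtain ⟨⟨hab, ha1⟩, hbc⟩ := ht
      simp only [ha, hb, pvExpandRange]
      rw [if_neg (by omega : ¬ a > b)]
      simp only
      rw [if_neg (by omega : ¬(a < 1 ∨ b > page_count))]
    · rw [Bool.not_eq_true] at hin
      simp only [hin, Bool.false_eq_true, if_false] at ht ⊢
      generalize hv : PySem.Int.ofStr? (PySem.Str.strip raw) = ov at ht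
      rcases ov with _ | v
      · exact Bool.noConfusion ht
      replace ht : (decide (1 ≤ v) && decide (v ≤ page_count)) = true := ht
      simp only [Bool.and_eq_true, decide_eq_true_eq] at ht
      simp only [Option.map_some, pvExpandSingle]
      rw [if_neg (by omega : ¬(v < 1 ∨ v > page_count))]
      rw [PySem.List.pyRange_one_singleton v]

def pvFlat (rs : List String) : List Int :=
  ((rs.map PySem.Str.strip).filter (· ≠ "")).flatMap pvExpand

theorem pvFoldA (page_count : Int) (rs : List String) (p : List Int)
    (h : ∀ r ∈ rs, PySem.Str.strip r = "" ∨ pvTokOK page_count (PySem.Str.strip r) = true) :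
    rs.foldl (fun ost raw => ost.bind (fun st => pvATok page_count st raw)) (some (p, p)) =
      some (PySem.Set.update p (pvFlat rs), PySem.Set.update p (pvFlat rs)) := by
  induction rs generalizing p with
  | nil => simp [pvFlat, PySem.Set.update]
  | cons r rs ih =>
    simp only [List.foldl_cons, Option.bind_some]
    rw [pvATok_ok page_count p r (h r List.mem_cons_self)]
    rw [ih _ (fun y hy => h y (List.mem_cons_of_mem _ hy))]
    by_cases hr : PySem.Str.strip r = ""
    · rw [hr, pvExpand_empty]
      simp [pvFlat, hr, PySem.Set.update]
    · have hfl : pvFlat (r :: rs) = pvExpand (PySem.Str.strip r) ++ pvFlat rs := by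
        simp [pvFlat, hr]
      rw [hfl]
      simp [PySem.Set.update, List.foldl_append]

theorem pvFoldB (page_count : Int) (rs : List String) (acc : List Int)
    (h : ∀ r ∈ rs, PySem.Str.strip r = "" ∨ pvTokOK page_count (PySem.Str.strip r) = true) :
    rs.foldl (fun o raw => o.bind (fun flat => pvBTok page_count flat raw)) (some acc) =
      some (acc ++ pvFlat rs) := by
  induction rs generalizing acc with
  | nil => simp [pvFlat]
  | cons r rs ih =>
    simp only [List.foldl_cons, Option.bind_some]
    rw [pvBTok_ok page_count acc r (h r List.mem_cons_self)]
    rw [ih _ (fun y hy => h y (List.mem_cons_of_mem _ hy))]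
    by_cases hr : PySem.Str.strip r = ""
    · rw [hr, pvExpand_empty]
      simp [pvFlat, hr]
    · have hfl : pvFlat (r :: rs) = pvExpand (PySem.Str.strip r) ++ pvFlat rs := by
        simp [pvFlat, hr]
      rw [hfl, List.append_assoc]

-- set(l) in first-occurrence order is strictly increasing under key = first index in l
theorem pvPairwiseIdx (l : List Int) :
    (PySem.Set.ofList l).Pairwise
      (fun a b => (PySem.List.index? l a).getD 0 < (PySem.List.index? l b).getD 0) := by
  induction l using List.reverseRecOn with
  | nil => simp [PySem.Set.ofList]
  | append_singleton l x ih =>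
    have hof : PySem.Set.ofList (l ++ [x]) = PySem.Set.add (PySem.Set.ofList l) x := by
      simp [PySem.Set.ofList_eq_foldl, List.foldl_append]
    have hmem : ∀ a ∈ PySem.Set.ofList l, a ∈ l := fun a ha =>
      (PySem.Set.mem_ofList l a).mp ha
    have hkey : ∀ a ∈ PySem.Set.ofList l,
        PySem.List.index? (l ++ [x]) a = PySem.List.index? l a := fun a ha =>
      PySem.List.index?_append_of_mem _ (hmem a ha)
    by_cases hx : x ∈ l
    · have hx' : x ∈ PySem.Set.ofList l := (PySem.Set.mem_ofList l x).mpr hx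
      have : PySem.Set.add (PySem.Set.ofList l) x = PySem.Set.ofList l := by
        simp [PySem.Set.add, hx']
      rw [hof, this]
      exact List.Pairwise.imp_of_mem
        (fun {a b} ha hb hab => by rw [hkey a ha, hkey b hb]; exact hab) ih
    · have hx' : x ∉ PySem.Set.ofList l := fun h => hx ((PySem.Set.mem_ofList l x).mp h)
      have : PySem.Set.add (PySem.Set.ofList l) x = PySem.Set.ofList l ++ [x] := by
        simp [PySem.Set.add, hx']
      rw [hof, this]
      rw [List.pairwise_append]
      refine ⟨List.Pairwise.imp_of_mem
        (fun {a b} ha hb hab => by rw [hkey a ha, hkey b hb]; exact hab) ih,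
        List.pairwise_singleton _ _, ?_⟩
      intro a ha b hb
      rw [List.mem_singleton] at hb
      subst hb
      rw [hkey a ha, PySem.List.index?_append_singleton_self l b hx]
      have hal := hmem a ha
      obtain ⟨k, hk⟩ := Option.isSome_iff_exists.mp
        ((PySem.List.index?_isSome_iff l a).mpr hal)
      obtain ⟨hklt, -, -⟩ := PySem.List.getElem_of_index?_eq_some hk
      rw [hk]
      simpa using hklt

theorem pvDedup_nil_iff (l : List Int) : PySem.List.dedup l = [] ↔ l = [] := by
  constructor
  · intro h
    cases l with
    | nil => rfl
    | cons x xs =>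
      exact absurd ((PySem.List.mem_dedup (x :: xs) x).mpr List.mem_cons_self) (by rw [h]; simp)
  · intro h; subst h; rfl

-- ===== VERDICT (by name: the statement is the Claim_ definition above) =====
theorem parse_page_spec_py_spec : Claim_equal_parse_page_spec_py := by
  intro page_spec page_count _ hpre
  unfold Spec_parse_page_spec_py parse_page_spec_py parse_page_spec_py_alt
  by_cases hall : page_spec = "" ∨ PySem.Str.lower (PySem.Str.strip page_spec) = "all"
  · rw [if_pos hall, if_pos hall]
  · rw [if_neg hall, if_neg hall]
    rcases hpre with h0 | h0 | ⟨-, hv⟩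
    · exact absurd (Or.inl h0) hall
    · exact absurd (Or.inr h0) hall
    set rs := (PySem.Str.split? page_spec ",").getD [] with hrs
    have hforall : ∀ r ∈ rs, PySem.Str.strip r = "" ∨
        pvTokOK page_count (PySem.Str.strip r) = true := by
      intro r hr
      by_cases h : PySem.Str.strip r = ""
      · exact Or.inl h
      · exact Or.inr (hv _ (List.mem_filter.mpr ⟨List.mem_map_of_mem hr, by simpa using h⟩))
    have hA := pvFoldA page_count rs [] hforall
    have hB := pvFoldB page_count rs [] hforall
    rw [show (PySem.Set.empty : PySem.Set Int) = ([] : List Int) from rfl]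
    rw [hA, hB]
    have hupd : PySem.Set.update ([] : List Int) (pvFlat rs) = PySem.List.dedup (pvFlat rs) := by
      simp [PySem.Set.update, PySem.Set.ofList_eq_foldl]
    have hsort : PySem.List.sorted (PySem.Set.ofList (pvFlat rs))
        (fun p => (PySem.List.index? (pvFlat rs) p).getD 0) false =
        PySem.Set.ofList (pvFlat rs) :=
      PySem.List.sorted_eq_of_perm_of_pairwise_lt (PySem.Set.ofList (pvFlat rs)) _ _
        (List.Perm.refl _) (pvPairwiseIdx (pvFlat rs))
    show (if PySem.Set.update ([] : List Int) (pvFlat rs) = [] then []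
        else PySem.Set.update ([] : List Int) (pvFlat rs)) =
      (if ([] : List Int) ++ pvFlat rs = [] then []
        else PySem.List.sorted (PySem.Set.ofList (([] : List Int) ++ pvFlat rs))
          (fun p => (PySem.List.index? (([] : List Int) ++ pvFlat rs) p).getD 0) false)
    rw [hupd]
    simp only [List.nil_append, hsort, pvDedup_nil_iff]
    by_cases hf : pvFlat rs = []
    · simp [hf]
    · rw [if_neg hf, if_neg hf]
      simp [PySem.List.dedup_eq_ofList]
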